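-- pv_equiv track=rewrite | github.com/solla00/CPPT_Onushchak_SI_KI-304_2 | lab7/Lab7Онущаккі304.py | generate_jagged_array
-- ===== SOURCE A (Python) =====
-- def generate_jagged_array(size, fill_char, corner_char):
--     jagged_array = []
--
--
--     start = size // 4
--     end = size - size // 4 - 1
--
--
--     inner_start = size // 3
--     inner_end = size - size // 3 - 1
--
--     inner_char = '*'
--
--     for i in range(size):
--         row = []
--         for j in range(size):
--
--
--             if (i == start and j == start) or (i == start and j == end) or \
--                (i == end and j == start) or (i == end and j == end):
--                 row.append(corner_char)
--
--
--             elif (i == start or i == end) and (start <= j <= end):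
--                 row.append(fill_char)
--             elif (j == start or j == end) and (start <= i <= end):
--                 row.append(fill_char)
--
--
--             elif (inner_start <= i <= inner_end) and (inner_start <= j <= inner_end):
--                 row.append(inner_char)
--
--
--             else:
--                 row.append('*')
--
--         jagged_array.append(row)
--
--     return jagged_array
-- ===== SOURCE B (Python) =====
-- def generate_jagged_array(size, fill_char, corner_char):
--     if size <= 0:
--         return []
--     start = size // 4
--     end = size - size // 4 - 1
--     left = ['*'] * start
--     right = ['*'] * (size - end - 1)
--     if end > start:
--         edge = left + [corner_char] + [fill_char] * (end - start - 1) + [corner_char] + right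
--         side = left + [fill_char] + ['*'] * (end - start - 1) + [fill_char] + right
--     else:
--         edge = left + [corner_char] + right
--         side = edge
--     blank = ['*'] * size
--     rows = []
--     for i in range(size):
--         if i == start or i == end:
--             rows.append(list(edge))
--         elif start < i < end:
--             rows.append(list(side))
--         else:
--             rows.append(list(blank))
--     return rows
-- ===== Notes on version B (the rewrite author's own statement) =====
-- stated objective: simpler
-- what changed: B precomputes the three distinct row shapes (border row, side row, all-star row) once as concatenations of replicated segments and selects one per row index, replacing A's per-cell four-way conditional over every (i,j) cell (the redundant inner-block test disappears since inner_char is '*').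
import Mathlib
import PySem

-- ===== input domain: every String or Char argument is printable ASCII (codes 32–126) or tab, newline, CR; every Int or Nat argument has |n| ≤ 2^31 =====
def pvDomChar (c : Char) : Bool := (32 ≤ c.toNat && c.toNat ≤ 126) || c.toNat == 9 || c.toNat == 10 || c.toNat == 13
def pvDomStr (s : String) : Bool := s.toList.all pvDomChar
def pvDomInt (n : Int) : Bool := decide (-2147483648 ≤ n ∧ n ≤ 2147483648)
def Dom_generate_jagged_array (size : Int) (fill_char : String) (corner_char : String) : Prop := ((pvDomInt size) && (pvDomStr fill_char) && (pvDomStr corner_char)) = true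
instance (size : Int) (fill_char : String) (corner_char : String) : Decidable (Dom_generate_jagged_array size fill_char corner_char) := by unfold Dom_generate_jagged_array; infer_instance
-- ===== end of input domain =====

-- B builds each of the three distinct row shapes (border row, side row, blank row) once by
-- concatenating replicated segments and reuses them, instead of A's per-cell conditional
-- over the full size×size grid; objective: simpler. Equivalence is on the return value.

-- ===== PORT A =====
-- A-side helper: the per-cell conditional from A's inner loop body, verbatim.
def pvCellA (st en ist ien : Int) (fill corner : String) (i j : Int) : String :=
  if (i = st ∧ j = st) ∨ (i = st ∧ j = en) ∨ (i = en ∧ j = st) ∨ (i = en ∧ j = en) then corner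
  else if (i = st ∨ i = en) ∧ (st ≤ j ∧ j ≤ en) then fill
  else if (j = st ∨ j = en) ∧ (st ≤ i ∧ i ≤ en) then fill
  else if (ist ≤ i ∧ i ≤ ien) ∧ (ist ≤ j ∧ j ≤ ien) then "*"
  else "*"

def generate_jagged_array (size : Int) (fill_char : String) (corner_char : String) : List (List String) :=
  let st := PySem.Int.floordiv size 4
  let en := size - PySem.Int.floordiv size 4 - 1
  let ist := PySem.Int.floordiv size 3
  let ien := size - PySem.Int.floordiv size 3 - 1
  (PySem.List.pyRange 0 size 1).foldl (fun jagged_array i =>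
    jagged_array ++ [(PySem.List.pyRange 0 size 1).foldl
      (fun row j => row ++ [pvCellA st en ist ien fill_char corner_char i j]) []]) []

-- ===== PORT B =====
def generate_jagged_array_alt (size : Int) (fill_char : String) (corner_char : String) : List (List String) :=
  if size ≤ 0 then []
  else
    let st := PySem.Int.floordiv size 4
    let en := size - PySem.Int.floordiv size 4 - 1
    let left := List.replicate st.toNat "*"
    let right := List.replicate (size - en - 1).toNat "*"
    let p :=
      if st < en then
        (left ++ [corner_char] ++ List.replicate (en - st - 1).toNat fill_char ++ [corner_char] ++ right,
         left ++ [fill_char] ++ List.replicate (en - st - 1).toNat "*" ++ [fill_char] ++ right)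
      else
        (left ++ [corner_char] ++ right, left ++ [corner_char] ++ right)
    let edge := p.1
    let side := p.2
    let blank := List.replicate size.toNat "*"
    (PySem.List.pyRange 0 size 1).foldl (fun rows i =>
      rows ++ [if i = st ∨ i = en then edge else if st < i ∧ i < en then side else blank]) []

-- ===== PRECONDITION & SPEC =====
def Spec_generate_jagged_array (size : Int) (fill_char : String) (corner_char : String) (out : List (List String)) : Prop := out = generate_jagged_array_alt size fill_char corner_char
instance (size : Int) (fill_char : String) (corner_char : String) (out : List (List String)) : Decidable (Spec_generate_jagged_array size fill_char corner_char out) := by unfold Spec_generate_jagged_array; infer_instance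

-- ===== CLAIM (what is proved, stated in full; the proofs are below) =====
def Claim_equal_generate_jagged_array : Prop := ∀ (size : Int) (fill_char : String) (corner_char : String), Dom_generate_jagged_array size fill_char corner_char → Spec_generate_jagged_array size fill_char corner_char (generate_jagged_array size fill_char corner_char)

-- ===== LEMMAS AND PROOFS =====

-- a map over a range on which f is constant is a replicate
lemma map_const_pyRange {f : Int → String} {a b : Int} {c : String}
    (h : ∀ j, a ≤ j → j < b → f j = c) :
    (PySem.List.pyRange a b 1).map f = List.replicate ((b - a).toNat) c := by
  rw [List.map_congr_left (g := fun _ => c)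
      (fun j hj => by rw [PySem.List.mem_pyRange_one] at hj; exact h j hj.1 hj.2)]
  rw [List.map_const', PySem.List.length_pyRange_one]

-- a row whose cells are "*" left of st, a at st, b strictly between st and en, c at en, "*" right of en
lemma map_row_split {f : Int → String} {size st en : Int} (a b c : String)
    (h0 : 0 ≤ st) (hlt : st < en) (h2 : en < size)
    (hL : ∀ j, 0 ≤ j → j < st → f j = "*")
    (hst : f st = a)
    (hmid : ∀ j, st < j → j < en → f j = b)
    (hen : f en = c)
    (hR : ∀ j, en < j → j < size → f j = "*") :
    (PySem.List.pyRange 0 size 1).map f =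
      List.replicate st.toNat "*" ++ [a] ++ List.replicate (en - st - 1).toNat b ++ [c] ++
        List.replicate (size - en - 1).toNat "*" := by
  rw [PySem.List.pyRange_one_append 0 st size h0 (by omega),
      PySem.List.pyRange_one_cons (show st < size by omega),
      PySem.List.pyRange_one_append (st+1) en size (by omega) (by omega),
      PySem.List.pyRange_one_cons (show en < size by omega)]
  simp only [List.map_append, List.map_cons]
  rw [hst, hen,
      map_const_pyRange (c := "*") (fun j hj1 hj2 => hL j (by omega) hj2),
      map_const_pyRange (c := b) (fun j hj1 hj2 => hmid j (by omega) hj2),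
      map_const_pyRange (c := "*") (fun j hj1 hj2 => hR j (by omega) hj2)]
  have e1 : (st - 0).toNat = st.toNat := by omega
  have e2 : (en - (st + 1)).toNat = (en - st - 1).toNat := by omega
  have e3 : (size - (en + 1)).toNat = (size - en - 1).toNat := by omega
  rw [e1, e2, e3]
  simp

-- a row whose cells are all "*" except one position st
lemma map_row_single {f : Int → String} {size st : Int} (a : String)
    (h0 : 0 ≤ st) (h2 : st < size)
    (hL : ∀ j, 0 ≤ j → j < st → f j = "*")
    (hst : f st = a)
    (hR : ∀ j, st < j → j < size → f j = "*") :
    (PySem.List.pyRange 0 size 1).map f =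
      List.replicate st.toNat "*" ++ [a] ++ List.replicate (size - st - 1).toNat "*" := by
  rw [PySem.List.pyRange_one_append 0 st size h0 (by omega),
      PySem.List.pyRange_one_cons (show st < size by omega)]
  simp only [List.map_append, List.map_cons]
  rw [hst,
      map_const_pyRange (c := "*") (fun j hj1 hj2 => hL j (by omega) hj2),
      map_const_pyRange (c := "*") (fun j hj1 hj2 => hR j (by omega) hj2)]
  have e1 : (st - 0).toNat = st.toNat := by omega
  have e3 : (size - (st + 1)).toNat = (size - st - 1).toNat := by omega
  rw [e1, e3]
  simp

-- a row whose cells are all "*"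
lemma map_row_blank {f : Int → String} {size : Int}
    (hA : ∀ j, 0 ≤ j → j < size → f j = "*") :
    (PySem.List.pyRange 0 size 1).map f = List.replicate size.toNat "*" := by
  rw [map_const_pyRange (c := "*") hA]
  congr 1
  omega

-- ===== VERDICT (by name: the statement is the Claim_ definition above) =====
theorem generate_jagged_array_spec : Claim_equal_generate_jagged_array := by
  intro size fill_char corner_char _
  unfold Spec_generate_jagged_array generate_jagged_array generate_jagged_array_alt
  by_cases hs : size ≤ 0
  · simp [hs, PySem.List.pyRange_one_eq_nil hs]
  · rw [if_neg hs]
    replace hs : 0 < size := by omega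
    simp only [PySem.List.foldl_append_singleton_eq_map, List.nil_append]
    set st := PySem.Int.floordiv size 4 with hstdef
    set en := size - PySem.Int.floordiv size 4 - 1 with hendef
    have hst4 : st = size / 4 := by
      rw [hstdef, PySem.Int.floordiv_eq_ediv_of_pos (by norm_num)]
    have h0 : 0 ≤ st := by omega
    have h1 : st ≤ en := by omega
    have h2 : en < size := by omega
    apply List.map_congr_left
    intro i hi
    rw [PySem.List.mem_pyRange_one] at hi
    by_cases hlt : st < en
    · rw [if_pos hlt]
      by_cases hie : i = st ∨ i = en
      · rw [if_pos hie]
        exact map_row_split corner_char fill_char corner_char h0 hlt h2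
          (fun j hj1 hj2 => by unfold pvCellA; split_ifs <;> first | rfl | omega)
          (by unfold pvCellA; split_ifs <;> first | rfl | omega)
          (fun j hj1 hj2 => by unfold pvCellA; split_ifs <;> first | rfl | omega)
          (by unfold pvCellA; split_ifs <;> first | rfl | omega)
          (fun j hj1 hj2 => by unfold pvCellA; split_ifs <;> first | rfl | omega)
      · rw [if_neg hie]
        by_cases hmid : st < i ∧ i < en
        · rw [if_pos hmid]
          exact map_row_split fill_char "*" fill_char h0 hlt h2
            (fun j hj1 hj2 => by unfold pvCellA; split_ifs <;> first | rfl | omega)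
            (by unfold pvCellA; split_ifs <;> first | rfl | omega)
            (fun j hj1 hj2 => by unfold pvCellA; split_ifs <;> first | rfl | omega)
            (by unfold pvCellA; split_ifs <;> first | rfl | omega)
            (fun j hj1 hj2 => by unfold pvCellA; split_ifs <;> first | rfl | omega)
        · rw [if_neg hmid]
          exact map_row_blank
            (fun j hj1 hj2 => by unfold pvCellA; split_ifs <;> first | rfl | omega)
    · -- st = en: only possible for size = 1
      rw [if_neg hlt]
      have hse : st = en := by omega
      by_cases hie : i = st ∨ i = en
      · rw [if_pos hie]
        have hrow : (PySem.List.pyRange 0 size 1).map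
            (pvCellA st en (PySem.Int.floordiv size 3) (size - PySem.Int.floordiv size 3 - 1)
              fill_char corner_char i) =
            List.replicate st.toNat "*" ++ [corner_char] ++ List.replicate (size - st - 1).toNat "*" :=
          map_row_single corner_char h0 (by omega)
            (fun j hj1 hj2 => by unfold pvCellA; split_ifs <;> first | rfl | omega)
            (by unfold pvCellA; split_ifs <;> first | rfl | omega)
            (fun j hj1 hj2 => by unfold pvCellA; split_ifs <;> first | rfl | omega)
        rw [hrow]
        have : (size - en - 1).toNat = (size - st - 1).toNat := by omega
        simp [this]
      · rw [if_neg hie, if_neg (by omega)]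
        exact map_row_blank
          (fun j hj1 hj2 => by unfold pvCellA; split_ifs <;> first | rfl | omega)
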